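-- pv_equiv track=rewrite | github.com/carlosapz/Ejercicios-Basicos-Python-1 | Funciones/eje-3.2.py | primerdig
-- ===== SOURCE A (Python) =====
-- def primerdig(n):
--     c=0
--     i=0
--     while n>10 :
--         d=n % 10
--         n=n//10
--         i=i+(d * (10**c))
--         c=c+1
--     return (n, c, i)
-- ===== SOURCE B (Python) =====
-- def primerdig(n):
--     orig = n
--     c = 0
--     while n > 10:
--         n = n // 10
--         c += 1
--     return (n, c, orig % 10 ** c)
-- ===== Notes on version B (the rewrite author's own statement) =====
-- stated objective: simpler
-- what changed: B's loop only counts divisions by 10; the trailing part is then one closed-form modulo orig % 10**c instead of A's per-digit accumulation i += d*(10**c).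
import Mathlib
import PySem

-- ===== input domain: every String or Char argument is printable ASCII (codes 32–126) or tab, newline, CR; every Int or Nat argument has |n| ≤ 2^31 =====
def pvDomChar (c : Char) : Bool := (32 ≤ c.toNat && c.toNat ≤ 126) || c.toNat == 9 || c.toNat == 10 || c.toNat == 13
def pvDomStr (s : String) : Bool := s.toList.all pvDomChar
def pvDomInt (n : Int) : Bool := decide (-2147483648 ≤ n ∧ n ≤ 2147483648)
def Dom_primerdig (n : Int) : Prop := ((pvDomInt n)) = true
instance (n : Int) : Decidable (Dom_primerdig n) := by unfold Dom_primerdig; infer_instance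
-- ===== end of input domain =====

-- ===== PORT A =====
-- One honest line: B keeps only a division counter in the loop and gets the trailing
-- remainder by one closed-form modulo; objective: simpler.
-- loop counter c stays a Nat (Python's c starts at 0 and only increments), cast to Int on return
theorem pvFloordiv10_toNat_lt {n : Int} (h : n > 10) :
    (PySem.Int.floordiv n 10).toNat < n.toNat := by
  rw [PySem.Int.floordiv_eq_ediv_of_pos (by norm_num)]
  omega

def primerdigLoopA (n : Int) (c : Nat) (i : Int) : Int × Int × Int :=
  if h : n > 10 then
    primerdigLoopA (PySem.Int.floordiv n 10) (c + 1) (i + PySem.Int.mod n 10 * 10 ^ c)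
  else (n, (c : Int), i)
termination_by n.toNat
decreasing_by exact pvFloordiv10_toNat_lt h

def primerdig (n : Int) : Int × Int × Int := primerdigLoopA n 0 0

-- ===== PORT B =====
def primerdigLoopB (n : Int) (c : Nat) : Int × Nat :=
  if h : n > 10 then primerdigLoopB (PySem.Int.floordiv n 10) (c + 1) else (n, c)
termination_by n.toNat
decreasing_by exact pvFloordiv10_toNat_lt h

def primerdig_alt (n : Int) : Int × Int × Int :=
  let p := primerdigLoopB n 0
  (p.1, (p.2 : Int), PySem.Int.mod n (10 ^ p.2))

-- ===== PRECONDITION & SPEC =====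
def Spec_primerdig (n : Int) (out : Int × Int × Int) : Prop := out = primerdig_alt n
instance (n : Int) (out : Int × Int × Int) : Decidable (Spec_primerdig n out) := by unfold Spec_primerdig; infer_instance

-- ===== CLAIM (what is proved, stated in full; the proofs are below) =====
def Claim_equal_primerdig : Prop := ∀ (n : Int), Dom_primerdig n → Spec_primerdig n (primerdig n)

-- ===== LEMMAS AND PROOFS =====
theorem pvLoopA_eq (n : Int) (c : Nat) (i : Int) :
    primerdigLoopA n c i =
      if n > 10 then
        primerdigLoopA (PySem.Int.floordiv n 10) (c + 1) (i + PySem.Int.mod n 10 * 10 ^ c)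
      else (n, (c : Int), i) := by
  rw [primerdigLoopA]; simp

theorem pvLoopB_eq (n : Int) (c : Nat) :
    primerdigLoopB n c =
      if n > 10 then primerdigLoopB (PySem.Int.floordiv n 10) (c + 1) else (n, c) := by
  rw [primerdigLoopB]; simp

theorem pvLoopB_shift (n : Int) (c : Nat) :
    primerdigLoopB n c = ((primerdigLoopB n 0).1, c + (primerdigLoopB n 0).2) := by
  rw [pvLoopB_eq n c, pvLoopB_eq n 0]
  split
  · next h =>
    rw [pvLoopB_shift (PySem.Int.floordiv n 10) (c + 1),
        pvLoopB_shift (PySem.Int.floordiv n 10) 1]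
    exact Prod.ext rfl (by omega)
  · simp
termination_by n.toNat
decreasing_by all_goals (rename_i h; exact pvFloordiv10_toNat_lt h)

-- the digit-peeling identity behind A's accumulator, over Nat
theorem pvNat_mod_mul (m k : Nat) :
    m % 10 + m / 10 % 10 ^ k * 10 = m % (10 * 10 ^ k) := by
  rw [Nat.mod_mul]; ring

theorem pvKey (n : Int) (c : Nat) (i : Int) :
    primerdigLoopA n c i =
      ((primerdigLoopB n 0).1, ((c + (primerdigLoopB n 0).2 : Nat) : Int),
        i + PySem.Int.mod n (10 ^ (primerdigLoopB n 0).2) * 10 ^ c) := by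
  rw [pvLoopA_eq n c i, pvLoopB_eq n 0]
  split
  · next h =>
    rw [pvKey (PySem.Int.floordiv n 10) (c + 1), pvLoopB_shift (PySem.Int.floordiv n 10) 1]
    refine Prod.ext rfl (Prod.ext ?_ ?_)
    · simp; omega
    · -- arithmetic core: n % 10 * 10^c + (n//10) % 10^k * 10^(c+1) = n % 10^(k+1) * 10^c
      simp only []
      set k := (primerdigLoopB (PySem.Int.floordiv n 10) 0).2 with hk
      rw [PySem.Int.floordiv_eq_ediv_of_pos (by norm_num),
          PySem.Int.mod_eq_emod_of_pos (b := 10) (by norm_num),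
          PySem.Int.mod_eq_emod_of_pos (by positivity),
          PySem.Int.mod_eq_emod_of_pos (by positivity)]
      have hn : (0:Int) ≤ n := by omega
      lift n to ℕ using hn with m
      have h2 : ((m : Int) % 10 + (m : Int) / 10 % (10 ^ k) * 10)
          = (m : Int) % (10 ^ (1 + k)) := by
        have := pvNat_mod_mul m k
        have hp : (10:Int) ^ (1 + k) = ((10 * 10 ^ k : Nat) : Int) := by push_cast; ring
        rw [hp]
        exact_mod_cast this
      calc i + (m : Int) % 10 * 10 ^ c + (m : Int) / 10 % 10 ^ k * 10 ^ (c + 1)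
          = i + ((m : Int) % 10 + (m : Int) / 10 % (10 ^ k) * 10) * 10 ^ c := by ring
        _ = i + (m : Int) % (10 ^ (1 + k)) * 10 ^ c := by rw [h2]
  · simp
termination_by n.toNat
decreasing_by rw [PySem.Int.floordiv_eq_ediv_of_pos (by norm_num)]; omega

-- ===== VERDICT (by name: the statement is the Claim_ definition above) =====
theorem primerdig_spec : Claim_equal_primerdig := by
  intro n _
  unfold Spec_primerdig primerdig primerdig_alt
  rw [pvKey]
  simp
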